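-- pv_equiv track=rewrite | github.com/McFaceDude/TDDD73 | svn3/d1c,_gr3-3/ok/lab_3.py | split_rec_loop
-- ===== SOURCE A (Python) =====
-- def split_rec_loop(seq, res_lower, res_upper):
--     """
--     Return the two strings res_lower and res_upper.
--     """
--     if not seq:
--         return(res_lower, res_upper)
--
--     elif seq[0].islower() or seq[0] == "_" or seq[0] == ".":
--         res_lower += seq[0]
--         return split_rec_loop(seq[1:], res_lower, res_upper)
--
--     elif seq[0].isupper() or seq[0] == " " or seq[0] == "|":
--         res_upper += seq[0]
--         return split_rec_loop(seq[1:], res_lower, res_upper)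
--
--     else:
--         return split_rec_loop(seq[1:], res_lower, res_upper)
--
--     return split_rec_loop(seq, res_lower, res_upper)
-- ===== SOURCE B (Python) =====
-- def split_rec_loop(seq, res_lower, res_upper):
--     """
--     Return the two strings res_lower and res_upper.
--     """
--     lowers = ''.join(c for c in seq if c.islower() or c in "_.")
--     uppers = ''.join(c for c in seq if c.isupper() or c in " |")
--     return (res_lower + lowers, res_upper + uppers)
-- ===== Notes on version B (the rewrite author's own statement) =====
-- stated objective: faster
-- what changed: Replaced the character-by-character tail recursion threading two accumulators (which copies seq[1:] at every step) with two independent filter passes over seq whose results are concatenated onto the incoming accumulators.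
import Mathlib
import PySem

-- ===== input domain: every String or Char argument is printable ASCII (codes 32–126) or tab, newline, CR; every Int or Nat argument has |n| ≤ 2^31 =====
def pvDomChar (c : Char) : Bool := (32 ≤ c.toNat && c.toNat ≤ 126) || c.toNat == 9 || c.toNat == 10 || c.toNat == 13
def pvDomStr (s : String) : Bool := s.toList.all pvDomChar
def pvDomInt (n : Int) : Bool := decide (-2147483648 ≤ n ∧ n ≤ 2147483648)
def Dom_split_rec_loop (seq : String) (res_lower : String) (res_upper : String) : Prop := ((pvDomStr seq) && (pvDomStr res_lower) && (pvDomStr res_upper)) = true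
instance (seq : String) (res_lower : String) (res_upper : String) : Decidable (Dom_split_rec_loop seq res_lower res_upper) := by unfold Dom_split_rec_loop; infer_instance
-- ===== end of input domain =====

-- B replaces the accumulator-threading tail recursion with two independent filter passes; same return value.
-- ===== PORT A =====
def pvIsLowGroup (c : Char) : Bool := PySem.Chars.islower c || c == '_' || c == '.'
def pvIsUpGroup (c : Char) : Bool := PySem.Chars.isupper c || c == ' ' || c == '|'

def splitRecA : List Char → List Char → List Char → List Char × List Char
  | [], lo, hi => (lo, hi)
  | c :: rest, lo, hi =>
    if pvIsLowGroup c then splitRecA rest (lo ++ [c]) hi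
    else if pvIsUpGroup c then splitRecA rest lo (hi ++ [c])
    else splitRecA rest lo hi

def split_rec_loop (seq : String) (res_lower : String) (res_upper : String) : String × String :=
  let r := splitRecA seq.toList res_lower.toList res_upper.toList
  (String.ofList r.1, String.ofList r.2)

-- ===== PORT B =====
def split_rec_loop_alt (seq : String) (res_lower : String) (res_upper : String) : String × String :=
  (String.ofList (res_lower.toList ++ seq.toList.filter pvIsLowGroup),
   String.ofList (res_upper.toList ++ seq.toList.filter pvIsUpGroup))

-- ===== PRECONDITION & SPEC =====
def Spec_split_rec_loop (seq : String) (res_lower : String) (res_upper : String) (out : String × String) : Prop := out = split_rec_loop_alt seq res_lower res_upper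
instance (seq : String) (res_lower : String) (res_upper : String) (out : String × String) : Decidable (Spec_split_rec_loop seq res_lower res_upper out) := by unfold Spec_split_rec_loop; infer_instance

-- ===== CLAIM (what is proved, stated in full; the proofs are below) =====
def Claim_equal_split_rec_loop : Prop := ∀ (seq : String) (res_lower : String) (res_upper : String), Dom_split_rec_loop seq res_lower res_upper → Spec_split_rec_loop seq res_lower res_upper (split_rec_loop seq res_lower res_upper)

-- ===== LEMMAS AND PROOFS =====

-- ===== VERDICT (by name: the statement is the Claim_ definition above) =====
theorem pvDisjoint (c : Char) (h : pvIsLowGroup c = true) : pvIsUpGroup c = false := by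
  simp [pvIsLowGroup, PySem.Chars.islower] at h
  simp [pvIsUpGroup, PySem.Chars.isupper]
  rcases h with (⟨h1, h2⟩ | h) | h
  · exact ⟨⟨fun _ => lt_of_lt_of_le (by decide : ('Z':Char) < 'a') h1,
      fun h' => absurd (h' ▸ h1) (by decide)⟩,
      fun h' => absurd (h' ▸ h2) (by decide)⟩
  · first | decide | (subst h; decide)
  · first | decide | (subst h; decide)

theorem splitRecA_eq (l lo hi : List Char) :
    splitRecA l lo hi = (lo ++ l.filter pvIsLowGroup, hi ++ l.filter pvIsUpGroup) := by
  induction l generalizing lo hi with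
  | nil => simp [splitRecA]
  | cons c rest ih =>
    by_cases h1 : pvIsLowGroup c = true
    · simp [splitRecA, h1, pvDisjoint c h1, ih]
    · by_cases h2 : pvIsUpGroup c = true
      · simp [splitRecA, h1, h2, ih]
      · simp [splitRecA, h1, h2, ih]

theorem split_rec_loop_spec : Claim_equal_split_rec_loop := by
  intro seq lo hi _
  unfold Spec_split_rec_loop split_rec_loop split_rec_loop_alt
  simp [splitRecA_eq]
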